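-- pv_equiv track=rewrite | github.com/kolyasalubov/UA-1202.PythonFundamentals | AndriyZhornyak/Eveything/HMW7 next/HMW7 next.py | solution
-- ===== SOURCE A (Python) =====
-- def solution(number):
--     if number < 0:
--         return 0
--     sum = 0
--     for i in str(number):
--         if int(i) % 3 == 0 or int(i) % 5 == 0:
--             sum+=int(i)
--     return sum
--     pass
-- ===== SOURCE B (Python) =====
-- def solution(number):
--     if number < 0:
--         return 0
--     n = number
--     total = 0
--     while n > 0:
--         d = n % 10
--         if d % 3 == 0 or d % 5 == 0:
--             total += d
--         n //= 10
--     return total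
-- ===== Notes on version B (the rewrite author's own statement) =====
-- stated objective: alternative
-- what changed: Replaces string conversion and per-character int() parsing with an arithmetic loop extracting decimal digits by remainder and floor division by ten.
import Mathlib
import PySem

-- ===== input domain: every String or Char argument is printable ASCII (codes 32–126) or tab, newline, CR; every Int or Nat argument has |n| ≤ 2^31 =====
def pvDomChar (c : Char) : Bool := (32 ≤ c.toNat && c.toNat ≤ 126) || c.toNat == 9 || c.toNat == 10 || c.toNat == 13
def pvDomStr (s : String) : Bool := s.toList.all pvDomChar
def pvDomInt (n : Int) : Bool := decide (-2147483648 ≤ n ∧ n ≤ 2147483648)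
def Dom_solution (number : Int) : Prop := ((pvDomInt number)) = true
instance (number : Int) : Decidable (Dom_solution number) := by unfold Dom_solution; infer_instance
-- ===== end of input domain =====

-- B replaces str()-and-int()-per-char digit iteration by an arithmetic loop extracting decimal digits via remainder and floor division by ten (alternative, same asymptotic cost).


-- ===== PORT A =====
-- int(i) for a one-character string i → (PySem.Int.ofChars? [c]).getD 0; on the digit
-- characters of str(number) for number ≥ 0 the parse is always `some`, so the default is never used.
def solution (number : Int) : Int :=
  if number < 0 then 0
  else
    (PySem.Int.toStr number).toList.foldl
      (fun s c =>
        let v := (PySem.Int.ofChars? [c]).getD 0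
        if PySem.Int.mod v 3 = 0 ∨ PySem.Int.mod v 5 = 0 then s + v else s) 0

-- ===== PORT B =====
-- the `while n > 0` loop of Source B, with (n, total) as the loop state
def solutionLoopB (n total : Int) : Int :=
  if _h : 0 < n then
    let d := PySem.Int.mod n 10
    solutionLoopB (PySem.Int.floordiv n 10)
      (if PySem.Int.mod d 3 = 0 ∨ PySem.Int.mod d 5 = 0 then total + d else total)
  else total
termination_by n.toNat
decreasing_by
  have h10 : PySem.Int.floordiv n 10 = n / 10 := PySem.Int.floordiv_eq_ediv_of_pos (by omega)
  rw [h10]; omega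

def solution_alt (number : Int) : Int :=
  if number < 0 then 0 else solutionLoopB number 0

-- ===== PRECONDITION & SPEC =====
def Spec_solution (number : Int) (out : Int) : Prop := out = solution_alt number
instance (number : Int) (out : Int) : Decidable (Spec_solution number out) := by unfold Spec_solution; infer_instance

-- ===== CLAIM (what is proved, stated in full; the proofs are below) =====
def Claim_equal_solution : Prop := ∀ (number : Int), Dom_solution number → Spec_solution number (solution number)

-- ===== LEMMAS AND PROOFS =====

-- contribution of one digit character in A's loop
def contribC (c : Char) : Int :=
  let v := (PySem.Int.ofChars? [c]).getD 0
  if PySem.Int.mod v 3 = 0 ∨ PySem.Int.mod v 5 = 0 then v else 0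

-- contribution of one numeric digit
def contribD (d : Nat) : Int := if d % 3 = 0 ∨ d % 5 = 0 then (d : Int) else 0

-- reference digit sum, little-endian arithmetic recursion on Nat
def natSum (m : Nat) : Int :=
  contribD (m % 10) + (if m / 10 = 0 then 0 else natSum (m / 10))
decreasing_by exact Nat.div_lt_self (Nat.pos_of_ne_zero (by omega)) (by omega)

theorem contribC_digitChar (d : Nat) (hd : d < 10) :
    contribC (Nat.digitChar d) = contribD d := by
  interval_cases d <;> decide

theorem foldl_eq_sum_contribC (cs : List Char) (s : Int) :
    cs.foldl
      (fun s c =>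
        let v := (PySem.Int.ofChars? [c]).getD 0
        if PySem.Int.mod v 3 = 0 ∨ PySem.Int.mod v 5 = 0 then s + v else s) s
      = s + (cs.map contribC).sum := by
  induction cs generalizing s with
  | nil => simp
  | cons c cs ih =>
    simp only [List.foldl_cons, List.map_cons, List.sum_cons, ih]
    unfold contribC
    split
    · next h => rw [if_pos h]; ring
    · next h => rw [if_neg h]; ring

theorem sum_toDigitsCore (f : Nat) :
    ∀ (m : Nat) (ds : List Char), m < f →
      ((Nat.toDigitsCore 10 f m ds).map contribC).sum
        = natSum m + ((ds.map contribC).sum) := by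
  induction f with
  | zero => intro m ds h; omega
  | succ f ih =>
    intro m ds h
    rw [Nat.toDigitsCore]
    by_cases h0 : m / 10 = 0
    · rw [if_pos h0]
      conv_rhs => rw [natSum]
      rw [if_pos h0]
      simp only [List.map_cons, List.sum_cons, contribC_digitChar _ (Nat.mod_lt m (by omega))]
      ring
    · rw [if_neg h0, ih (m / 10) _ (by
        have : m / 10 < m := Nat.div_lt_self (by omega) (by omega)
        omega)]
      conv_rhs => rw [natSum]
      rw [if_neg h0]
      simp only [List.map_cons, List.sum_cons, contribC_digitChar _ (Nat.mod_lt m (by omega))]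
      ring

theorem solutionLoopB_eq (m : Nat) : ∀ (total : Int),
    0 < m → solutionLoopB (m : Int) total = total + natSum m := by
  induction m using Nat.strong_induction_on with
  | _ m ih =>
    intro total hm
    rw [solutionLoopB, dif_pos (by exact_mod_cast hm)]
    have hmod : PySem.Int.mod (m : Int) 10 = ((m % 10 : Nat) : Int) := by
      exact_mod_cast PySem.Int.mod_natCast m 10
    have hdiv : PySem.Int.floordiv (m : Int) 10 = ((m / 10 : Nat) : Int) := by
      exact_mod_cast PySem.Int.floordiv_natCast m 10
    have hcond : (PySem.Int.mod (PySem.Int.mod (m : Int) 10) 3 = 0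
        ∨ PySem.Int.mod (PySem.Int.mod (m : Int) 10) 5 = 0)
        ↔ (m % 10 % 3 = 0 ∨ m % 10 % 5 = 0) := by
      rw [hmod]
      rw [show PySem.Int.mod ((m % 10 : Nat) : Int) 3 = ((m % 10 % 3 : Nat) : Int) from
            by exact_mod_cast PySem.Int.mod_natCast (m % 10) 3,
          show PySem.Int.mod ((m % 10 : Nat) : Int) 5 = ((m % 10 % 5 : Nat) : Int) from
            by exact_mod_cast PySem.Int.mod_natCast (m % 10) 5]
      constructor <;> (intro h; rcases h with h | h) <;> [left; right; left; right] <;> exact_mod_cast h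
    by_cases h0 : m / 10 = 0
    · rw [hdiv, h0]
      rw [solutionLoopB, dif_neg (by simp)]
      conv_rhs => rw [natSum]
      rw [if_pos h0]
      unfold contribD
      by_cases hc : m % 10 % 3 = 0 ∨ m % 10 % 5 = 0
      · rw [if_pos (hcond.mpr hc), if_pos hc, hmod]; ring
      · rw [if_neg (fun h => hc (hcond.mp h)), if_neg hc]; ring
    · rw [hdiv, ih (m / 10) (Nat.div_lt_self hm (by omega)) _ (Nat.pos_of_ne_zero h0)]
      conv_rhs => rw [natSum]
      rw [if_neg h0]
      unfold contribD
      by_cases hc : m % 10 % 3 = 0 ∨ m % 10 % 5 = 0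
      · rw [if_pos (hcond.mpr hc), if_pos hc, hmod]; ring
      · rw [if_neg (fun h => hc (hcond.mp h)), if_neg hc]; ring

-- ===== VERDICT (by name: the statement is the Claim_ definition above) =====
theorem solution_spec : Claim_equal_solution := by
  intro number _
  unfold Spec_solution solution solution_alt
  by_cases hneg : number < 0
  · rw [if_pos hneg, if_pos hneg]
  · rw [if_neg hneg, if_neg hneg]
    have hnn : 0 ≤ number := le_of_not_gt hneg
    obtain ⟨m, rfl⟩ : ∃ m : Nat, number = (m : Int) := ⟨number.toNat, (Int.toNat_of_nonneg hnn).symm⟩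
    rw [PySem.Int.toList_toStr]
    have htc : PySem.Int.toChars (m : Int) = Nat.toDigits 10 m := by
      unfold PySem.Int.toChars
      rw [if_neg (by exact_mod_cast hneg)]
      norm_num
    rw [htc, foldl_eq_sum_contribC]
    rw [show Nat.toDigits 10 m = Nat.toDigitsCore 10 (m + 1) m [] from rfl]
    rw [sum_toDigitsCore (m + 1) m [] (by omega)]
    by_cases h0 : m = 0
    · subst h0
      rw [solutionLoopB, dif_neg (by norm_num)]
      rw [show natSum 0 = 0 from by rw [natSum]; decide]
      simp
    · rw [solutionLoopB_eq m 0 (Nat.pos_of_ne_zero h0)]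
      simp
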